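-- pv_equiv track=rewrite | github.com/AxiomOrient/composable-skills | skills/compose/scripts/parse_macro.py | split_top_level_csv
-- ===== SOURCE A (Python) =====
-- from typing import Dict, List, Optional, Set, Tuple
--
-- def split_top_level_csv(text: str) -> List[str]:
--     out: List[str] = []
--     cur: List[str] = []
--     depth = 0
--     for ch in text:
--         if ch == "{":
--             depth += 1
--         elif ch == "}":
--             depth = max(0, depth - 1)
--         if ch == "," and depth == 0:
--             tok = "".join(cur).strip()
--             if tok:
--                 out.append(tok)
--             cur = []
--             continue
--         cur.append(ch)
--     tok = "".join(cur).strip()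
--     if tok:
--         out.append(tok)
--     return out
-- ===== SOURCE B (Python) =====
-- from typing import List
--
--
-- def split_top_level_csv(text: str) -> List[str]:
--     # pass 1: indices of all top-level commas
--     cuts: List[int] = []
--     depth = 0
--     for i, ch in enumerate(text):
--         if ch == "{":
--             depth += 1
--         elif ch == "}":
--             depth = max(0, depth - 1)
--         if ch == "," and depth == 0:
--             cuts.append(i)
--     # pass 2: slice between consecutive cut points
--     out: List[str] = []
--     prev = -1
--     for c in cuts + [len(text)]:
--         tok = text[prev + 1 : c].strip()
--         if tok:
--             out.append(tok)
--         prev = c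
--     return out
-- ===== Notes on version B (the rewrite author's own statement) =====
-- stated objective: alternative
-- what changed: Replaces the single char-accumulating loop with a two-pass scheme: first collect the indices of all depth-0 commas, then slice the original string between consecutive cut points, stripping and keeping non-empty pieces.
import Mathlib
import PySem

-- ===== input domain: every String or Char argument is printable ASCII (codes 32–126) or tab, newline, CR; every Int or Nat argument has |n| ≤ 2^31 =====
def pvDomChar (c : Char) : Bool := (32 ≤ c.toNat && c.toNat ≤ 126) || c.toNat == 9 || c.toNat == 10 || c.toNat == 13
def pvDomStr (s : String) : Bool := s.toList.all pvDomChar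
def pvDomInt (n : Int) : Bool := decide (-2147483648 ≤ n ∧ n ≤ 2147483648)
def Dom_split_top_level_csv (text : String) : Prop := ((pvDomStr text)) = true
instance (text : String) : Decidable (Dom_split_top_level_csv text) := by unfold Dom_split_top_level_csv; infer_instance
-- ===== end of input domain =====

-- B is an alternative two-pass decomposition (find top-level comma indices, then slice);
-- same O(n) cost, same results.

-- ===== PORT A =====
-- A: one pass, accumulating current token chars; flush at each depth-0 comma.
def stepA (st : List String × List Char × Int) (ch : Char) : List String × List Char × Int :=
  let out := st.1
  let cur := st.2.1
  let depth := st.2.2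
  let depth := if ch = '{' then depth + 1 else if ch = '}' then max 0 (depth - 1) else depth
  if ch = ',' ∧ depth = 0 then
    let tok := PySem.Chars.strip cur
    (if tok ≠ [] then out ++ [String.ofList tok] else out, [], depth)
  else
    (out, cur ++ [ch], depth)

def split_top_level_csv (text : String) : List String :=
  let r := text.toList.foldl stepA ([], [], 0)
  let tok := PySem.Chars.strip r.2.1
  if tok ≠ [] then r.1 ++ [String.ofList tok] else r.1

-- ===== PORT B =====
-- B pass 1 step: collect index of each depth-0 comma.
def cutStep (st : List Int × Int) (p : Int × Char) : List Int × Int :=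
  let cuts := st.1
  let depth := st.2
  let ch := p.2
  let depth := if ch = '{' then depth + 1 else if ch = '}' then max 0 (depth - 1) else depth
  (if ch = ',' ∧ depth = 0 then cuts ++ [p.1] else cuts, depth)

-- B pass 2 step: slice text[prev+1 : c], strip, keep if non-empty.
def sliceStep (t : List Char) (st : List String × Int) (c : Int) : List String × Int :=
  let tok := PySem.Chars.strip (PySem.List.slice t (some (st.2 + 1)) (some c))
  (if tok ≠ [] then st.1 ++ [String.ofList tok] else st.1, c)

def split_top_level_csv_alt (text : String) : List String :=
  let s := text.toList
  let cuts := ((PySem.List.enumerate s 0).foldl cutStep ([], 0)).1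
  ((cuts ++ [(s.length : Int)]).foldl (sliceStep s) ([], -1)).1

-- ===== PRECONDITION & SPEC =====
def Spec_split_top_level_csv (text : String) (out : List String) : Prop := out = split_top_level_csv_alt text
instance (text : String) (out : List String) : Decidable (Spec_split_top_level_csv text out) := by unfold Spec_split_top_level_csv; infer_instance

-- ===== CLAIM (what is proved, stated in full; the proofs are below) =====
def Claim_equal_split_top_level_csv : Prop := ∀ (text : String), Dom_split_top_level_csv text → Spec_split_top_level_csv text (split_top_level_csv text)

-- ===== LEMMAS AND PROOFS =====

-- Reference: the list of raw (unstripped) segments produced by cutting at depth-0 commas.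
def segs : List Char → Int → List Char → List (List Char)
  | cur, _, [] => [cur]
  | cur, d, ch :: rest =>
    let d' := if ch = '{' then d + 1 else if ch = '}' then max 0 (d - 1) else d
    if ch = ',' ∧ d' = 0 then cur :: segs [] d' rest
    else segs (cur ++ [ch]) d' rest

def emit (ss : List (List Char)) : List String :=
  ((ss.map PySem.Chars.strip).filter (· ≠ [])).map String.ofList

def finishA (r : List String × List Char × Int) : List String :=
  let tok := PySem.Chars.strip r.2.1
  if tok ≠ [] then r.1 ++ [String.ofList tok] else r.1

def cutsRec : Int → Int → List Char → List Int
  | _, _, [] => []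
  | i, d, ch :: rest =>
    let d' := if ch = '{' then d + 1 else if ch = '}' then max 0 (d - 1) else d
    if ch = ',' ∧ d' = 0 then i :: cutsRec (i + 1) d' rest
    else cutsRec (i + 1) d' rest

lemma emit_cons (c : List Char) (ss : List (List Char)) :
    emit (c :: ss) =
      (if PySem.Chars.strip c ≠ [] then [String.ofList (PySem.Chars.strip c)] else []) ++ emit ss := by
  simp only [emit, List.map_cons, List.filter_cons]
  split_ifs with h1 h2 h2 <;> simp_all

lemma A_loop (l : List Char) : ∀ (out : List String) (cur : List Char) (d : Int),
    finishA (l.foldl stepA (out, cur, d)) = out ++ emit (segs cur d l) := by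
  induction l with
  | nil =>
    intro out cur d
    simp only [List.foldl_nil, finishA, segs, emit_cons]
    split_ifs <;> simp [emit]
  | cons ch rest ih =>
    intro out cur d
    simp only [List.foldl_cons, stepA, segs]
    split_ifs <;> simp_all [emit_cons]

lemma cuts_loop (l : List Char) : ∀ (i : Int) (acc : List Int) (d : Int),
    ((PySem.List.enumerate l i).foldl cutStep (acc, d)).1 = acc ++ cutsRec i d l := by
  induction l with
  | nil => intro i acc d; simp [PySem.List.enumerate, cutsRec]
  | cons ch rest ih =>
    intro i acc d
    rw [PySem.List.enumerate_cons]
    simp only [List.foldl_cons, cutStep, cutsRec]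
    split_ifs <;> simp [ih]

lemma slice_full (t : List Char) (q p : Nat) (hlen : t.length ≤ p) :
    PySem.List.slice t (some (q : Int)) (some (p : Int)) = t.drop q := by
  rw [PySem.List.slice_natCast]
  exact List.take_of_length_le (by simp; omega)

lemma sliceInt_empty (t : List Char) (a : Int) :
    PySem.List.slice t (some a) (some a) = [] := by
  rw [← List.length_eq_zero_iff, PySem.List.length_slice t a a]
  omega

lemma slice_snoc (t : List Char) (q p : Nat) (hqp : q ≤ p) (hp : p < t.length) :
    PySem.List.slice t (some (q : Int)) (some ((p : Int) + 1)) =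
      PySem.List.slice t (some (q : Int)) (some (p : Int)) ++ [t[p]] := by
  have h1 : ((p : Int) + 1) = ((p + 1 : Nat) : Int) := by push_cast; ring
  rw [h1, PySem.List.slice_natCast, PySem.List.slice_natCast]
  have h2 : p + 1 - q = (p - q) + 1 := by omega
  rw [h2, List.take_add_one]
  congr 1
  have h3 : p - q < (t.drop q).length := by simp; omega
  rw [List.getElem?_eq_getElem h3]
  simp [List.getElem_drop]
  congr 1
  omega

lemma B_loop (t : List Char) : ∀ (s : List Char) (p q : Nat) (out : List String) (d : Int),
    q ≤ p → s = t.drop p →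
    ((cutsRec (p : Int) d s ++ [(t.length : Int)]).foldl (sliceStep t) (out, (q : Int) - 1)).1
      = out ++ emit (segs (PySem.List.slice t (some (q : Int)) (some (p : Int))) d s) := by
  intro s
  induction s with
  | nil =>
    intro p q out d hqp hs
    have hlen : t.length ≤ p := by
      by_contra hle
      have hne : t.drop p ≠ [] := by
        simp [List.drop_eq_nil_iff]; omega
      exact hne hs.symm
    simp only [cutsRec, List.nil_append, List.foldl_cons, List.foldl_nil, sliceStep, segs]
    rw [show (q : Int) - 1 + 1 = (q : Int) from by ring,
      slice_full t q t.length le_rfl, slice_full t q p hlen, emit_cons]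
    split_ifs <;> simp [emit]
  | cons ch rest ih =>
    intro p q out d hqp hs
    have hp : p < t.length := by
      by_contra hle
      rw [List.drop_eq_nil_of_le (by omega)] at hs
      exact List.cons_ne_nil ch rest hs
    have hch : t[p] = ch := by
      have h2 := congrArg (·.head?) hs
      simp [List.head?_drop, List.getElem?_eq_getElem hp] at h2
      simp [h2]
    have hrest : rest = t.drop (p + 1) := by
      have h2 := congrArg (·.tail) hs
      simpa [List.tail_drop] using h2
    simp only [cutsRec, segs]
    set d' := if ch = '{' then d + 1 else if ch = '}' then max 0 (d - 1) else d with hd'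
    by_cases h : ch = ',' ∧ d' = 0
    · rw [if_pos h, if_pos h, List.cons_append, List.foldl_cons]
      have ih2 : ∀ (out' : List String),
          ((cutsRec ((p : Int) + 1) d' rest ++ [(t.length : Int)]).foldl (sliceStep t)
            (out', (p : Int))).1 = out' ++ emit (segs [] d' rest) := by
        intro out'
        have h3 := ih (p + 1) (p + 1) out' d' le_rfl hrest
        push_cast at h3
        rw [show (p : Int) + 1 - 1 = (p : Int) from by ring] at h3
        rw [sliceInt_empty t ((p : Int) + 1)] at h3
        exact h3
      simp only [sliceStep]
      rw [show (q : Int) - 1 + 1 = (q : Int) from by ring, ih2, emit_cons]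
      split_ifs <;> simp
    · rw [if_neg h, if_neg h]
      have h3 := ih (p + 1) q out d' (by omega) hrest
      push_cast at h3
      rw [slice_snoc t q p hqp hp, hch] at h3
      exact h3

theorem split_top_level_csv_spec : Claim_equal_split_top_level_csv := by
  unfold Claim_equal_split_top_level_csv
  intro text _
  simp only [Spec_split_top_level_csv, split_top_level_csv, split_top_level_csv_alt]
  have hA := A_loop text.toList [] [] 0
  simp only [finishA, List.nil_append] at hA
  have hc := cuts_loop text.toList 0 [] 0
  simp only [List.nil_append] at hc
  have hB := B_loop text.toList text.toList 0 0 [] 0 le_rfl (by simp : text.toList = text.toList.drop 0)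
  simp only [Nat.cast_zero, List.nil_append] at hB
  rw [sliceInt_empty text.toList 0] at hB
  rw [show (0 : Int) - 1 = (-1 : Int) from by ring] at hB
  rw [hA, hc, hB]
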